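-- pv_equiv track=rewrite | github.com/poshut/bwinf37-runde1 | a2-Twist/twist.py | woerterbuch_erstellen
-- ===== SOURCE A (Python) =====
-- def wort_zu_schluessel(wort: str):
--     mittlere_buchstaben = ''.join(sorted(list(wort[1:-1])))
--     return (wort[0].lower(), wort[-1].lower(), mittlere_buchstaben)
--
-- def woerterbuch_erstellen(woerter_liste):
--     woerterbuch = {}
--     for wort in woerter_liste:
--         if wort != '':
--             schluessel = wort_zu_schluessel(wort)
--             if schluessel not in woerterbuch:
--                 woerterbuch[schluessel] = []
--             woerterbuch[schluessel].append(wort)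
--     return woerterbuch
-- ===== SOURCE B (Python) =====
-- def wort_zu_schluessel(wort: str):
--     mittlere_buchstaben = ''.join(sorted(list(wort[1:-1])))
--     return (wort[0].lower(), wort[-1].lower(), mittlere_buchstaben)
--
-- def woerterbuch_erstellen(woerter_liste):
--     keyed = [(wort_zu_schluessel(w), w) for w in woerter_liste if w != '']
--     seen = []
--     for k, _ in keyed:
--         if k not in seen:
--             seen.append(k)
--     return {k: [w for (k2, w) in keyed if k2 == k] for k in seen}
-- ===== Notes on version B (the rewrite author's own statement) =====
-- stated objective: alternative
-- what changed: Replaces the on-the-fly dict bucketing (create-bucket-then-append inside the loop) by a three-stage pipeline: precompute (key, word) pairs for the non-empty words, collect the distinct keys in first-occurrence order, then build each bucket with one filtering comprehension per key.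
import Mathlib
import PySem

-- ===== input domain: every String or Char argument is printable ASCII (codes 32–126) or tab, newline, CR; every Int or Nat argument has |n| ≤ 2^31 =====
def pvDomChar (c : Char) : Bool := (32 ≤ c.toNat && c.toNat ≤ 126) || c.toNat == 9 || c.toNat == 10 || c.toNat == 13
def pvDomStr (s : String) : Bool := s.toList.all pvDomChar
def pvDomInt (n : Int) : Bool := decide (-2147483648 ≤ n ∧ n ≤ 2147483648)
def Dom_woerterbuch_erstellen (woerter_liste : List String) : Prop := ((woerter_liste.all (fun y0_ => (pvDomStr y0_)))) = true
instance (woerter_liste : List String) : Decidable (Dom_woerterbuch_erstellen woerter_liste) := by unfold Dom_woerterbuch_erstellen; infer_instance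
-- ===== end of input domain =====

-- B replaces A's on-the-fly dict bucketing by a pipeline: key the non-empty words once,
-- collect the distinct keys in first-occurrence order, then build each bucket by one filter
-- per key (objective: alternative decomposition, same result list).

-- ===== PORT A =====
-- shared helper (both Python versions define it verbatim); both programs call it only on
-- wort ≠ "" — on "" Python raises IndexError, the fallback branch below is unreachable.
def wort_zu_schluessel (wort : String) : String × String × String :=
  let cs := wort.toList
  let mittlere_buchstaben := String.mk (PySem.List.sorted (PySem.List.slice cs (some 1) (some (-1))) (fun c => c))
  match PySem.List.pyGet? cs 0, PySem.List.pyGet? cs (-1) with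
  | some c0, some cl =>
      (String.mk (PySem.Chars.lower [c0]), String.mk (PySem.Chars.lower [cl]), mittlere_buchstaben)
  | _, _ => ("", "", mittlere_buchstaben)

def woerterbuch_erstellen (woerter_liste : List String) : List (String × String × String × List String) :=
  let wb : PySem.Dict (String × String × String) (List String) :=
    woerter_liste.foldl (fun wb wort =>
      if wort != "" then
        let schluessel := wort_zu_schluessel wort
        let wb := if wb.contains schluessel then wb else wb.insert schluessel []
        wb.modify schluessel [] (fun l => l ++ [wort])
      else wb) ⟨[]⟩
  -- the Python dict of 3-tuple keys is the flat association list of 4-tuples (type convention)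
  wb.items.map (fun p => (p.1.1, p.1.2.1, p.1.2.2, p.2))

-- ===== PORT B =====
def woerterbuch_erstellen_alt (woerter_liste : List String) : List (String × String × String × List String) :=
  let keyed := (woerter_liste.filter (fun w => w != "")).map (fun w => (wort_zu_schluessel w, w))
  let seen := keyed.foldl (fun s kw => if s.contains kw.1 then s else s ++ [kw.1])
      ([] : List (String × String × String))
  seen.map (fun k => (k.1, k.2.1, k.2.2, (keyed.filter (fun kw => kw.1 == k)).map (fun kw => kw.2)))

-- ===== PRECONDITION & SPEC =====
def Spec_woerterbuch_erstellen (woerter_liste : List String) (out : List (String × String × String × List String)) : Prop := out = woerterbuch_erstellen_alt woerter_liste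
instance (woerter_liste : List String) (out : List (String × String × String × List String)) : Decidable (Spec_woerterbuch_erstellen woerter_liste out) := by unfold Spec_woerterbuch_erstellen; infer_instance

-- ===== CLAIM (what is proved, stated in full; the proofs are below) =====
def Claim_equal_woerterbuch_erstellen : Prop := ∀ (woerter_liste : List String), Dom_woerterbuch_erstellen woerter_liste → Spec_woerterbuch_erstellen woerter_liste (woerterbuch_erstellen woerter_liste)

-- ===== LEMMAS AND PROOFS =====

-- proof-local names for the two loops
def pvStep (wb : PySem.Dict (String × String × String) (List String)) (wort : String) :
    PySem.Dict (String × String × String) (List String) :=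
  if wort != "" then
    let schluessel := wort_zu_schluessel wort
    let wb := if wb.contains schluessel then wb else wb.insert schluessel []
    wb.modify schluessel [] (fun l => l ++ [wort])
  else wb

def pvLoop (ws : List String) : PySem.Dict (String × String × String) (List String) :=
  ws.foldl pvStep ⟨[]⟩

def pvKeyed (ws : List String) : List ((String × String × String) × String) :=
  (ws.filter (fun w => w != "")).map (fun w => (wort_zu_schluessel w, w))

def pvSeenStep (s : List (String × String × String)) (kw : (String × String × String) × String) :
    List (String × String × String) :=
  if s.contains kw.1 then s else s ++ [kw.1]

def pvSeen (ws : List String) : List (String × String × String) :=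
  (pvKeyed ws).foldl pvSeenStep []

def pvBucket (ws : List String) (k : String × String × String) : List String :=
  ((pvKeyed ws).filter (fun kw => kw.1 == k)).map (fun kw => kw.2)

lemma pv_portA_eq (ws : List String) :
    woerterbuch_erstellen ws = (pvLoop ws).items.map (fun p => (p.1.1, p.1.2.1, p.1.2.2, p.2)) := rfl

lemma pv_portB_eq (ws : List String) :
    woerterbuch_erstellen_alt ws = (pvSeen ws).map (fun k => (k.1, k.2.1, k.2.2, pvBucket ws k)) := rfl

lemma pv_mem_step (acc : List (String × String × String)) (kw : (String × String × String) × String)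
    (k : String × String × String) :
    k ∈ pvSeenStep acc kw ↔ k ∈ acc ∨ k = kw.1 := by
  unfold pvSeenStep
  split
  · rename_i h
    constructor
    · exact fun h' => Or.inl h'
    · rintro (h' | rfl)
      · exact h'
      · simpa using h
  · simp [List.mem_append]

lemma pv_mem_foldl (l : List ((String × String × String) × String))
    (acc : List (String × String × String)) (k : String × String × String) :
    k ∈ l.foldl pvSeenStep acc ↔ k ∈ acc ∨ ∃ kw ∈ l, kw.1 = k := by
  induction l generalizing acc with
  | nil => simp
  | cons kw l ih =>
    rw [List.foldl_cons, ih, pv_mem_step]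
    constructor
    · rintro ((h | rfl) | ⟨kw', h1, h2⟩)
      · exact Or.inl h
      · exact Or.inr ⟨kw, by simp, rfl⟩
      · exact Or.inr ⟨kw', List.mem_cons_of_mem _ h1, h2⟩
    · rintro (h | ⟨kw', h1, h2⟩)
      · exact Or.inl (Or.inl h)
      · rcases List.mem_cons.mp h1 with rfl | h1
        · exact Or.inl (Or.inr h2.symm)
        · exact Or.inr ⟨kw', h1, h2⟩

lemma pv_mem_seen (ws : List String) (k : String × String × String) :
    k ∈ pvSeen ws ↔ ∃ kw ∈ pvKeyed ws, kw.1 = k := by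
  simpa using pv_mem_foldl (pvKeyed ws) [] k

lemma pv_bucket_nil (ws : List String) (k : String × String × String) (h : k ∉ pvSeen ws) :
    pvBucket ws k = [] := by
  have hf : (pvKeyed ws).filter (fun kw => kw.1 == k) = [] := by
    rw [List.filter_eq_nil_iff]
    intro kw hkw
    simp only [beq_iff_eq]
    exact fun he => h ((pv_mem_seen ws k).mpr ⟨kw, hkw, he⟩)
  unfold pvBucket
  rw [hf]
  rfl

lemma pv_find_map (seen : List (String × String × String))
    (g : String × String × String → List String) (k : String × String × String)
    (h : k ∈ seen) :
    List.find? (fun p => p.1 == k) (seen.map (fun k' => (k', g k'))) = some (k, g k) := by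
  induction seen with
  | nil => simp at h
  | cons k' seen ih =>
    by_cases hk : k' = k
    · subst hk
      rw [List.map_cons, List.find?_cons_of_pos (by simp)]
    · rw [List.map_cons, List.find?_cons_of_neg (by simp [hk])]
      refine ih ?_
      rcases List.mem_cons.mp h with rfl | h'
      · exact absurd rfl hk
      · exact h'

lemma pv_contains_map (seen : List (String × String × String))
    (g : String × String × String → List String) (k : String × String × String) :
    (PySem.Dict.mk (seen.map (fun k' => (k', g k')))).contains k = true ↔ k ∈ seen := by
  unfold PySem.Dict.contains
  simp only [List.any_map, List.any_eq_true, Function.comp_apply, beq_iff_eq]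
  exact ⟨fun ⟨k', h1, h2⟩ => h2 ▸ h1, fun h => ⟨k, h, rfl⟩⟩

lemma pv_main (ws : List String) :
    (pvLoop ws).items = (pvSeen ws).map (fun k => (k, pvBucket ws k)) := by
  induction ws using List.reverseRecOn with
  | nil => rfl
  | append_singleton ws w ih =>
    have hloop : pvLoop (ws ++ [w]) = pvStep (pvLoop ws) w := by
      unfold pvLoop; rw [List.foldl_append]; rfl
    have hkeyed : pvKeyed (ws ++ [w]) =
        pvKeyed ws ++ (if w != "" then [(wort_zu_schluessel w, w)] else []) := by
      unfold pvKeyed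
      by_cases hw : w = "" <;> simp [hw]
    by_cases hw : w = ""
    · subst hw
      have h1 : pvSeen (ws ++ [""]) = pvSeen ws := by
        unfold pvSeen; rw [hkeyed]; simp
      have h2 : ∀ k, pvBucket (ws ++ [""]) k = pvBucket ws k := by
        intro k; unfold pvBucket; rw [hkeyed]; simp
      rw [hloop]
      simp only [pvStep]
      rw [if_neg (by simp)]
      rw [ih, h1]
      exact List.map_congr_left (fun k _ => by rw [h2])
    · have hw' : (w != "") = true := by simp [hw]
      set k0 := wort_zu_schluessel w with hk0
      have hkeyed' : pvKeyed (ws ++ [w]) = pvKeyed ws ++ [(k0, w)] := by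
        rw [hkeyed, if_pos hw']
      have hseen : pvSeen (ws ++ [w]) = pvSeenStep (pvSeen ws) (k0, w) := by
        unfold pvSeen; rw [hkeyed', List.foldl_append]; rfl
      have hbucket : ∀ k, pvBucket (ws ++ [w]) k =
          pvBucket ws k ++ (if k0 == k then [w] else []) := by
        intro k; unfold pvBucket
        rw [hkeyed', List.filter_append, List.map_append]
        congr 1
        by_cases h : k0 = k <;> simp [h]
      have hloopmk : pvLoop ws = PySem.Dict.mk ((pvSeen ws).map (fun k => (k, pvBucket ws k))) := by
        rw [← ih]
      rw [hloop]
      simp only [pvStep, hw', if_true, ← hk0]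
      by_cases hmem : k0 ∈ pvSeen ws
      · have hc : (pvLoop ws).contains k0 = true := by
          rw [hloopmk]; exact (pv_contains_map _ _ _).mpr hmem
        have hsc : (pvSeen ws).contains k0 = true := by simpa using hmem
        rw [if_pos hc]
        have hgetD : (pvLoop ws).getD k0 [] = pvBucket ws k0 := by
          unfold PySem.Dict.getD PySem.Dict.get?
          rw [ih, pv_find_map _ _ _ hmem]
          rfl
        unfold PySem.Dict.modify PySem.Dict.insert
        rw [if_pos hc, hgetD]
        show ((pvLoop ws).items.map _) = _
        rw [ih, hseen]
        unfold pvSeenStep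
        rw [if_pos hsc, List.map_map]
        apply List.map_congr_left
        intro k hk
        simp only [Function.comp_apply]
        by_cases hkk : k = k0
        · subst hkk
          rw [if_pos (by simp), hbucket]
          simp
        · rw [if_neg (by simp [hkk]), hbucket, if_neg (by simp only [beq_iff_eq]; exact Ne.symm hkk),
            List.append_nil]
      · have hc : ¬ (pvLoop ws).contains k0 = true := by
          rw [hloopmk]
          exact fun h => hmem ((pv_contains_map _ _ _).mp h)
        have hsc : ¬ (pvSeen ws).contains k0 = true := by simpa using hmem
        have hbnil : pvBucket ws k0 = [] := pv_bucket_nil ws k0 hmem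
        rw [if_neg hc]
        have hins : (pvLoop ws).insert k0 [] = PySem.Dict.mk ((pvLoop ws).items ++ [(k0, [])]) := by
          unfold PySem.Dict.insert; rw [if_neg hc]
        rw [hins]
        have hfind : List.find? (fun p => p.1 == k0) ((pvLoop ws).items ++ [(k0, [])]) =
            some (k0, []) := by
          rw [List.find?_append]
          have hnone : List.find? (fun p => p.1 == k0) (pvLoop ws).items = none := by
            rw [List.find?_eq_none]
            intro p hp
            rw [ih] at hp
            rcases List.mem_map.mp hp with ⟨k', hk', rfl⟩
            simp only [beq_iff_eq]
            exact fun h => hmem (by rw [← h]; exact hk')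
          rw [hnone]
          simp
        have hgetD2 : (PySem.Dict.mk ((pvLoop ws).items ++ [(k0, [])])).getD k0 [] = [] := by
          unfold PySem.Dict.getD PySem.Dict.get?
          rw [hfind]
          rfl
        have hc2 : (PySem.Dict.mk ((pvLoop ws).items ++ [(k0, [])])).contains k0 = true := by
          simp [PySem.Dict.contains]
        unfold PySem.Dict.modify PySem.Dict.insert
        rw [if_pos hc2, hgetD2]
        show (((pvLoop ws).items ++ [(k0, [])]).map _) = _
        rw [hseen]
        unfold pvSeenStep
        rw [if_neg hsc, List.map_append, List.map_append, ih, List.map_map]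
        congr 1
        · apply List.map_congr_left
          intro k hk
          simp only [Function.comp_apply]
          have hkk : k ≠ k0 := fun h => hmem (h ▸ hk)
          rw [if_neg (by simp [hkk]), hbucket, if_neg (by simp only [beq_iff_eq]; exact Ne.symm hkk),
            List.append_nil]
        · simp [hbucket, hbnil]

-- ===== VERDICT (by name: the statement is the Claim_ definition above) =====
theorem woerterbuch_erstellen_spec : Claim_equal_woerterbuch_erstellen := by
  intro ws _
  unfold Spec_woerterbuch_erstellen
  rw [pv_portA_eq, pv_portB_eq, pv_main, List.map_map]
  apply List.map_congr_left
  intro k _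
  rfl
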